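-- pv_equiv track=rewrite | github.com/DevMehta22/InformationSecurityLab | hillCipher.py | find_inverse_2x2
-- ===== SOURCE A (Python) =====
-- def find_inverse_2x2(matrix):
--     determinant = (matrix[0][0] * matrix[1][1] - matrix[0][1] * matrix[1][0]) % 26
--     if determinant == 0:
--         return None
--     for num in range(26):
--         if (determinant * num) % 26 == 1:
--             modular_inverse = num
--             break
--     else:
--         return None
--     return [
--         [(matrix[1][1] * modular_inverse) % 26, (-matrix[0][1] * modular_inverse) % 26],
--         [(-matrix[1][0] * modular_inverse) % 26, (matrix[0][0] * modular_inverse) % 26]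
--     ]
-- ===== SOURCE B (Python) =====
-- def find_inverse_2x2(matrix):
--     a, b = matrix[0][0], matrix[0][1]
--     c, d = matrix[1][0], matrix[1][1]
--     determinant = (a * d - b * c) % 26
--     # extended Euclidean algorithm on (determinant, 26)
--     old_r, r = determinant, 26
--     old_s, s = 1, 0
--     while r != 0:
--         q = old_r // r
--         old_r, r = r, old_r - q * r
--         old_s, s = s, old_s - q * s
--     if old_r != 1:
--         return None
--     modular_inverse = old_s % 26
--     return [
--         [(d * modular_inverse) % 26, (-b * modular_inverse) % 26],
--         [(-c * modular_inverse) % 26, (a * modular_inverse) % 26]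
--     ]
-- ===== Notes on version B (the rewrite author's own statement) =====
-- stated objective: alternative
-- what changed: The linear search over range(26) for the modular inverse is replaced by the extended Euclidean algorithm maintaining Bezout coefficients (which also subsumes the determinant==0 guard, since gcd(0,26)=26); the cofactor matrix construction is unchanged.
import Mathlib
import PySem

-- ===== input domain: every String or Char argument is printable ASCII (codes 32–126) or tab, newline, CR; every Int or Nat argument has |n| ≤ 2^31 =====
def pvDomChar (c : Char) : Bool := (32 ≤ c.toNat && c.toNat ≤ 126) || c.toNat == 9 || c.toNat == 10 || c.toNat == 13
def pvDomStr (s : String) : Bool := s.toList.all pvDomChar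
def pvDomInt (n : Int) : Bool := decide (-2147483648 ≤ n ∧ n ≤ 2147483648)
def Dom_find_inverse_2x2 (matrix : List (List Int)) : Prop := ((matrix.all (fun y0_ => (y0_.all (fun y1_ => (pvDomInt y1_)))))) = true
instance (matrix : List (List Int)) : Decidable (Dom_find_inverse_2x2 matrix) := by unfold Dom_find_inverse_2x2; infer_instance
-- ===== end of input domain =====

-- B replaces A's linear search over range(26) for the modular inverse by the extended
-- Euclidean algorithm (alternative algorithm, same cost class); the matrix build is unchanged.


-- ===== PORT A =====
-- A's `for num in range(26): if (det*num)%26==1: break / else: None`, preceded by the det==0 guard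
def pvInvA (det : Int) : Option Int :=
  if det = 0 then none
  else (PySem.List.pyRange 0 26 1).find? (fun num => PySem.Int.mod (det * num) 26 == 1)

def find_inverse_2x2 (matrix : List (List Int)) : Option (List (List Int)) :=
  match matrix with
  | (a :: b :: _) :: (c :: d :: _) :: _ =>
    let det := PySem.Int.mod (a * d - b * c) 26
    match pvInvA det with
    | none => none
    | some m => some [[PySem.Int.mod (d * m) 26, PySem.Int.mod (-b * m) 26],
                      [PySem.Int.mod (-c * m) 26, PySem.Int.mod (a * m) 26]]
  | _ => none

-- ===== PORT B =====
-- Source B's `while r != 0` extended-Euclid loop; fuel 30 only makes it total (26 steps suffice from r = 26)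
def pvEuclid : Nat → Int → Int → Int → Int → Int × Int
  | 0, old_r, _, old_s, _ => (old_r, old_s)
  | Nat.succ fuel, old_r, r, old_s, s =>
    if r = 0 then (old_r, old_s)
    else pvEuclid fuel r (old_r - PySem.Int.floordiv old_r r * r)
                    s (old_s - PySem.Int.floordiv old_r r * s)

def pvInvB (det : Int) : Option Int :=
  let gx := pvEuclid 30 det 26 1 0
  if gx.1 ≠ 1 then none else some (PySem.Int.mod gx.2 26)

def find_inverse_2x2_alt (matrix : List (List Int)) : Option (List (List Int)) :=
  (PySem.List.pyGet? matrix 0).bind fun r0 =>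
  (PySem.List.pyGet? matrix 1).bind fun r1 =>
  (PySem.List.pyGet? r0 0).bind fun a =>
  (PySem.List.pyGet? r0 1).bind fun b =>
  (PySem.List.pyGet? r1 0).bind fun c =>
  (PySem.List.pyGet? r1 1).bind fun d =>
  let det := PySem.Int.mod (a * d - b * c) 26
  (pvInvB det).map fun m =>
    [[PySem.Int.mod (d * m) 26, PySem.Int.mod (-b * m) 26],
     [PySem.Int.mod (-c * m) 26, PySem.Int.mod (a * m) 26]]

-- ===== PRECONDITION & SPEC =====
-- A indexes matrix[0][0..1] and matrix[1][0..1]; on shorter input it raises IndexError, excluded here.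
def Pre_find_inverse_2x2 (matrix : List (List Int)) : Prop :=
  2 ≤ matrix.length ∧ 2 ≤ (matrix.getD 0 []).length ∧ 2 ≤ (matrix.getD 1 []).length
instance (matrix : List (List Int)) : Decidable (Pre_find_inverse_2x2 matrix) := by
  unfold Pre_find_inverse_2x2; infer_instance
def pvWitness_find_inverse_2x2 : List (List Int) := [[1, 2], [3, 4]]

def Spec_find_inverse_2x2 (matrix : List (List Int)) (out : Option (List (List Int))) : Prop := out = find_inverse_2x2_alt matrix
instance (matrix : List (List Int)) (out : Option (List (List Int))) : Decidable (Spec_find_inverse_2x2 matrix out) := by unfold Spec_find_inverse_2x2; infer_instance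

-- ===== CLAIM (what is proved, stated in full; the proofs are below) =====
def Claim_equal_find_inverse_2x2 : Prop := ∀ (matrix : List (List Int)), Dom_find_inverse_2x2 matrix → Pre_find_inverse_2x2 matrix → Spec_find_inverse_2x2 matrix (find_inverse_2x2 matrix)

-- ===== LEMMAS AND PROOFS =====

lemma pvGet_cons0 {x : Int} {xs : List Int} : PySem.List.pyGet? (x :: xs) 0 = some x := by
  simp [PySem.List.pyGet?, PySem.List.pyIdx?]

lemma pvGet_cons1 {x y : Int} {xs : List Int} : PySem.List.pyGet? (x :: y :: xs) 1 = some y := by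
  simp [PySem.List.pyGet?, PySem.List.pyIdx?]

lemma pvGetL_cons0 {x : List Int} {xs : List (List Int)} : PySem.List.pyGet? (x :: xs) 0 = some x := by
  simp [PySem.List.pyGet?, PySem.List.pyIdx?]

lemma pvGetL_cons1 {x y : List Int} {xs : List (List Int)} : PySem.List.pyGet? (x :: y :: xs) 1 = some y := by
  simp [PySem.List.pyGet?, PySem.List.pyIdx?]

lemma pvInv_eq_of_lt (n : Nat) (hn : n < 26) : pvInvA (n : Int) = pvInvB (n : Int) := by
  have h : ∀ m ∈ List.range 26, pvInvA (m : Int) = pvInvB (m : Int) := by decide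
  exact h n (List.mem_range.mpr hn)

lemma pvInv_eq (det : Int) (h0 : 0 ≤ det) (h1 : det < 26) : pvInvA det = pvInvB det := by
  have : det = ((det.toNat : Nat) : Int) := (Int.toNat_of_nonneg h0).symm
  rw [this]
  exact pvInv_eq_of_lt det.toNat (by omega)

-- ===== VERDICT (by name: the statement is the Claim_ definition above) =====
theorem find_inverse_2x2_spec : Claim_equal_find_inverse_2x2 := by
  intro matrix _ hpre
  obtain ⟨h1, h2, h3⟩ := hpre
  match matrix with
  | (a :: b :: _) :: (c :: d :: _) :: _ =>
    show find_inverse_2x2 _ = find_inverse_2x2_alt _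
    unfold find_inverse_2x2 find_inverse_2x2_alt
    dsimp only
    have hge : (0 : Int) ≤ PySem.Int.mod (a * d - b * c) 26 := PySem.Int.mod_nonneg _ (by norm_num)
    have hlt : PySem.Int.mod (a * d - b * c) 26 < 26 := PySem.Int.mod_lt _ (by norm_num)
    rw [pvInv_eq _ hge hlt]
    simp only [pvGet_cons0, pvGet_cons1, pvGetL_cons0, pvGetL_cons1, Option.bind_some]
    cases pvInvB (PySem.Int.mod (a * d - b * c) 26) <;> rfl
  | [] => simp at h1
  | [_] => simp at h1
  | [] :: _ :: _ => simp at h2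
  | [_] :: _ :: _ => simp at h2
  | (_ :: _ :: _) :: [] :: _ => simp at h3
  | (_ :: _ :: _) :: [_] :: _ => simp at h3
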